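-- pv_equiv track=rewrite | github.com/mooja/dailyprogrammer | challenge221easy.py | display_positions
-- ===== SOURCE A (Python) =====
-- def display_positions(positions):
--     max_row = max(p[0] for p in positions.keys())
--     max_col = max(p[1] for p in positions.keys())
--
--     for row in range(max_row):
--         line = []
--         for col in range(max_col):
--             if (row, col) in positions:
--                 line.append(positions[(row, col)])
--             else:
--                 line.append(' ')
--         yield(''.join(line)+'\n')
-- ===== SOURCE B (Python) =====
-- def display_positions(positions):
--     max_row = max(p[0] for p in positions)
--     max_col = max(p[1] for p in positions)
--
--     grid = [[' '] * max_col for _ in range(max_row)]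
--     for (r, c), ch in positions.items():
--         if 0 <= r < max_row and 0 <= c < max_col:
--             grid[r][c] = ch
--     for row in grid:
--         yield ''.join(row) + '\n'
-- ===== Notes on version B (the rewrite author's own statement) =====
-- stated objective: alternative
-- what changed: Instead of scanning every (row,col) cell and testing dict membership, B pre-allocates a blank max_row x max_col grid, scatters the dict entries into it in one pass over positions.items() (skipping out-of-range keys), and joins each buffer row.
import Mathlib
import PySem

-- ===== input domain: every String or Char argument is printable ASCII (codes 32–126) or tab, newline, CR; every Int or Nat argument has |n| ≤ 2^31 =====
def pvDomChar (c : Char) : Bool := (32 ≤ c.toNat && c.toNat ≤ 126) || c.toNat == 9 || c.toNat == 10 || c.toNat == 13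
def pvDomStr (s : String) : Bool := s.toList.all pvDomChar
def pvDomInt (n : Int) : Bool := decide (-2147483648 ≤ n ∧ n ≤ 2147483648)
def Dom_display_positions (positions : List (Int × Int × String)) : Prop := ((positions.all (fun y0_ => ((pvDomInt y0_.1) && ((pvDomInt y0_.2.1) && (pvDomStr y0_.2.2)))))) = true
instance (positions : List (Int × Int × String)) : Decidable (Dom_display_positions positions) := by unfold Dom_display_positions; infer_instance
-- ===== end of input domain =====

-- B scatters the dict entries once into a pre-blanked 2D buffer instead of scanning every
-- cell and testing dict membership (objective: alternative decomposition, same exact output).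

-- ===== PORT A =====
-- A scans each cell of the max_row × max_col box and looks the cell up in the dict
-- ('(row, col) in positions' / 'positions[(row, col)]' = first match in the assoc list).
def display_positions (positions : List (Int × Int × String)) : List String :=
  let maxRow := (PySem.List.max? (positions.map (fun p => p.1)) (fun x => x)).getD 0
  let maxCol := (PySem.List.max? (positions.map (fun p => p.2.1)) (fun x => x)).getD 0
  (PySem.List.pyRange 0 maxRow 1).map (fun row =>
    PySem.Str.join ""
      (((PySem.List.pyRange 0 maxCol 1).map (fun col =>
        match positions.find? (fun p => p.1 == row && p.2.1 == col) with
        | some p => p.2.2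
        | none => " ")) ++ ["\n"]))

-- ===== PORT B =====
-- B pre-allocates the blank grid, then one pass over the entries writes each in-range
-- entry into its cell (grid[r][c] = ch), then joins each row.
def display_positions_alt (positions : List (Int × Int × String)) : List String :=
  let maxRow := (PySem.List.max? (positions.map (fun p => p.1)) (fun x => x)).getD 0
  let maxCol := (PySem.List.max? (positions.map (fun p => p.2.1)) (fun x => x)).getD 0
  let grid0 := List.replicate maxRow.toNat (List.replicate maxCol.toNat " ")
  let grid := positions.foldl (fun g p =>
    if 0 ≤ p.1 ∧ p.1 < maxRow ∧ 0 ≤ p.2.1 ∧ p.2.1 < maxCol then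
      g.modify p.1.toNat (fun row => row.set p.2.1.toNat p.2.2)
    else g) grid0
  grid.map (fun row => PySem.Str.join "" (row ++ ["\n"]))

-- ===== PRECONDITION & SPEC =====
-- Pre_ excludes the empty dict, on which A's max() raises ValueError, and assoc lists with
-- duplicate (row, col) keys, which represent no Python dict (the input is a dict).
def Pre_display_positions (positions : List (Int × Int × String)) : Prop :=
  positions ≠ [] ∧ (positions.map (fun p => (p.1, p.2.1))).Nodup
instance (positions : List (Int × Int × String)) : Decidable (Pre_display_positions positions) := by
  unfold Pre_display_positions; infer_instance

def pvWitness_display_positions : (List (Int × Int × String)) := [(1, 2, "x"), (0, 0, "#")]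

def Spec_display_positions (positions : List (Int × Int × String)) (out : List String) : Prop := out = display_positions_alt positions
instance (positions : List (Int × Int × String)) (out : List String) : Decidable (Spec_display_positions positions out) := by unfold Spec_display_positions; infer_instance

-- ===== CLAIM (what is proved, stated in full; the proofs are below) =====
def Claim_equal_display_positions : Prop := ∀ (positions : List (Int × Int × String)), Dom_display_positions positions → Pre_display_positions positions → Spec_display_positions positions (display_positions positions)

-- ===== LEMMAS AND PROOFS =====

-- One scatter step of B's loop (abbreviation for the proofs only).
def pvStep (mr mc : Int) (g : List (List String)) (p : Int × Int × String) : List (List String) :=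
  if 0 ≤ p.1 ∧ p.1 < mr ∧ 0 ≤ p.2.1 ∧ p.2.1 < mc then
    g.modify p.1.toNat (fun row => row.set p.2.1.toNat p.2.2)
  else g

theorem pvStep_length (mr mc : Int) (g : List (List String)) (p : Int × Int × String) :
    (pvStep mr mc g p).length = g.length := by
  unfold pvStep; split_ifs <;> simp [List.length_modify]

theorem pvFoldl_length (mr mc : Int) (ps : List (Int × Int × String)) (g : List (List String)) :
    (ps.foldl (pvStep mr mc) g).length = g.length := by
  induction ps generalizing g with
  | nil => rfl
  | cons p t ih => simpa [List.foldl_cons, pvStep_length] using ih (pvStep mr mc g p)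

theorem pvStep_row_length (mr mc : Int) (g : List (List String)) (p : Int × Int × String)
    (i : Nat) (hi : i < (pvStep mr mc g p).length) (hi' : i < g.length) :
    ((pvStep mr mc g p)[i]'hi).length = (g[i]'hi').length := by
  unfold pvStep at *
  split_ifs with h
  · rw [List.getElem_modify]
    split_ifs with he
    · simp [List.length_set]
    · rfl
  · rfl

theorem pvFoldl_row_length (mr mc : Int) (ps : List (Int × Int × String)) (g : List (List String))
    (i : Nat) (hi : i < (ps.foldl (pvStep mr mc) g).length) (hi' : i < g.length) :
    (((ps.foldl (pvStep mr mc) g))[i]'hi).length = (g[i]'hi').length := by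
  induction ps generalizing g with
  | nil => rfl
  | cons p t ih =>
      have h1 : i < (pvStep mr mc g p).length := by rw [pvStep_length]; exact hi'
      have h2 : i < (t.foldl (pvStep mr mc) (pvStep mr mc g p)).length := by
        rw [pvFoldl_length]; exact h1
      calc ((List.foldl (pvStep mr mc) (pvStep mr mc g p) t)[i]'h2).length
          = ((pvStep mr mc g p)[i]'h1).length := ih (pvStep mr mc g p) h2 h1
        _ = (g[i]'hi').length := pvStep_row_length mr mc g p i h1 hi'

-- with unique keys, a find? whose predicate pins the key down reads the same from the
-- reversed list (there is at most one matching entry).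
theorem pvFind_rev (ps : List (Int × Int × String)) (k : Int × Int)
    (hnd : (ps.map (fun p => (p.1, p.2.1))).Nodup)
    (pred : Int × Int × String → Bool)
    (hp : ∀ p, pred p = true → (p.1, p.2.1) = k) :
    ps.reverse.find? pred = ps.find? pred := by
  induction ps with
  | nil => rfl
  | cons p t ih =>
      simp only [List.map_cons, List.nodup_cons] at hnd
      rw [List.reverse_cons, List.find?_append]
      by_cases hpr : pred p = true
      · have hnone : t.find? pred = none := by
          rw [List.find?_eq_none]
          intro q hq hq'
          apply hnd.1
          have : (p.1, p.2.1) = (q.1, q.2.1) := by rw [hp p hpr, hp q hq']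
          rw [this]
          exact List.mem_map_of_mem hq
        have hnone' : t.reverse.find? pred = none := by
          rw [List.find?_eq_none] at *
          intro q hq; exact hnone q (List.mem_reverse.mp hq)
        simp [hnone', hpr]
      · rw [ih hnd.2]
        cases hf : t.find? pred with
        | none => simp [hf, hpr]
        | some q => simp [hf, hpr]

-- the scattered grid, read at (i, j), is the last entry written there (blank if none)
theorem pvGrid_get (mr mc : Int) (ps : List (Int × Int × String)) (g : List (List String))
    (hg : g.length = mr.toNat) (hrow : ∀ (k : Nat) (hk : k < g.length), (g[k]'hk).length = mc.toNat)
    (i j : Nat) (hi : i < mr.toNat) (hj : j < mc.toNat)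
    (hi' : i < (ps.foldl (pvStep mr mc) g).length)
    (hj' : j < ((ps.foldl (pvStep mr mc) g)[i]'hi').length) :
    ((ps.foldl (pvStep mr mc) g)[i]'hi')[j]'hj' =
      match ps.reverse.find? (fun p => p.1 == (i : Int) && p.2.1 == (j : Int)) with
      | some p => p.2.2
      | none => (g[i]'(by omega))[j]'(by rw [hrow i (by omega)]; exact hj) := by
  induction ps generalizing g with
  | nil => rfl
  | cons p t ih =>
      have hig : i < g.length := by omega
      have hstep_len : (pvStep mr mc g p).length = g.length := pvStep_length mr mc g p
      have hig' : i < (pvStep mr mc g p).length := by omega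
      have hjg : j < (g[i]'hig).length := by rw [hrow i hig]; exact hj
      have hjstep : j < ((pvStep mr mc g p)[i]'hig').length := by
        rw [pvStep_row_length mr mc g p i hig' hig]; exact hjg
      have hstep_rows : ∀ (k : Nat) (hk : k < (pvStep mr mc g p).length),
          ((pvStep mr mc g p)[k]'hk).length = mc.toNat := by
        intro k hk
        have hkg : k < g.length := by omega
        rw [pvStep_row_length mr mc g p k hk hkg]
        exact hrow k hkg
      have hi'' : i < (t.foldl (pvStep mr mc) (pvStep mr mc g p)).length := by
        simpa [List.foldl_cons] using hi'
      have hj'' : j < ((t.foldl (pvStep mr mc) (pvStep mr mc g p))[i]'hi'').length := by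
        simpa [List.foldl_cons] using hj'
      show ((t.foldl (pvStep mr mc) (pvStep mr mc g p))[i]'hi'')[j]'hj'' = _
      rw [ih (pvStep mr mc g p) (by omega) hstep_rows hi'' hj'']
      rw [List.reverse_cons, List.find?_append]
      cases hf : t.reverse.find? (fun p => p.1 == (i : Int) && p.2.1 == (j : Int)) with
      | some q => simp
      | none =>
          simp only [Option.none_or]
          by_cases hpr : (p.1 == (i : Int) && p.2.1 == (j : Int)) = true
          · have hp12 : p.1 = (i : Int) ∧ p.2.1 = (j : Int) := by simpa using hpr
            have hp1 := hp12.1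
            have hp2 := hp12.2
            have hguard : 0 ≤ p.1 ∧ p.1 < mr ∧ 0 ≤ p.2.1 ∧ p.2.1 < mc := by
              refine ⟨by omega, by omega, by omega, by omega⟩
            have hit : p.1.toNat = i := by omega
            have hjt : p.2.1.toNat = j := by omega
            have hval : pvStep mr mc g p
                = g.modify p.1.toNat (fun row => row.set p.2.1.toNat p.2.2) := by
              unfold pvStep; rw [if_pos hguard]
            simp only [List.find?_cons, hpr]
            show ((pvStep mr mc g p)[i]'hig')[j]'hjstep = p.2.2
            simp [hval, hit, hjt]
          · simp only [List.find?_cons, hpr]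
            show ((pvStep mr mc g p)[i]'hig')[j]'hjstep = (g[i]'hig)[j]'hjg
            by_cases hguard : 0 ≤ p.1 ∧ p.1 < mr ∧ 0 ≤ p.2.1 ∧ p.2.1 < mc
            · have hval : pvStep mr mc g p
                  = g.modify p.1.toNat (fun row => row.set p.2.1.toNat p.2.2) := by
                unfold pvStep; rw [if_pos hguard]
              by_cases hit : p.1.toNat = i
              · have hjt : p.2.1.toNat ≠ j := by
                  intro hjt
                  apply hpr
                  simp only [Bool.and_eq_true, beq_iff_eq]
                  constructor <;> omega
                simp [hval, hit, hjt]
              · simp [hval, hit]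
            · have hval : pvStep mr mc g p = g := by unfold pvStep; rw [if_neg hguard]
              simp [hval]

-- A's cell-scan picture equals B's scattered grid, for any box bounds mr, mc.
theorem pvMain (positions : List (Int × Int × String))
    (hnd : (positions.map (fun p => (p.1, p.2.1))).Nodup) (mr mc : Int) :
    (PySem.List.pyRange 0 mr 1).map (fun row =>
      PySem.Str.join ""
        (((PySem.List.pyRange 0 mc 1).map (fun col =>
          match positions.find? (fun p => p.1 == row && p.2.1 == col) with
          | some p => p.2.2
          | none => " ")) ++ ["\n"]))
    = (positions.foldl (pvStep mr mc)
        (List.replicate mr.toNat (List.replicate mc.toNat " "))).map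
        (fun row => PySem.Str.join "" (row ++ ["\n"])) := by
  set g0 := List.replicate mr.toNat (List.replicate mc.toNat " ") with hg0
  have hg0len : g0.length = mr.toNat := by simp [hg0]
  have hg0row : ∀ (k : Nat) (hk : k < g0.length), (g0[k]'hk).length = mc.toNat := by
    intro k hk; simp [hg0]
  set G := positions.foldl (pvStep mr mc) g0 with hG
  have hGlen : G.length = mr.toNat := by rw [hG, pvFoldl_length, hg0len]
  apply List.ext_getElem
  · simp [PySem.List.length_pyRange_one, hGlen]
  · intro i h1 h2
    simp only [List.getElem_map]
    have hiN : i < mr.toNat := by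
      have := h1; simp only [List.length_map, PySem.List.length_pyRange_one] at this; omega
    have hGi : i < G.length := by omega
    have hrowval : (PySem.List.pyRange 0 mr 1)[i]'(by
        rw [PySem.List.length_pyRange_one]; omega) = (i : Int) := by
      simp [PySem.List.getElem_pyRange_one]
    rw [hrowval]
    have hGirow : (G[i]'hGi).length = mc.toNat := by
      have h := pvFoldl_row_length mr mc positions g0 i
        (by rw [pvFoldl_length]; omega) (by omega)
      exact h.trans (hg0row i (by omega))
    suffices hsuf : (PySem.List.pyRange 0 mc 1).map (fun col =>
        match positions.find? (fun p => p.1 == (i : Int) && p.2.1 == col) with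
        | some p => p.2.2
        | none => " ") = G[i]'hGi by rw [hsuf]
    apply List.ext_getElem
    · simp [PySem.List.length_pyRange_one, hGirow]
    · intro j hj1 hj2
      have hjN : j < mc.toNat := by
        have := hj1; simp only [List.length_map, PySem.List.length_pyRange_one] at this; omega
      simp only [List.getElem_map]
      have hcolval : (PySem.List.pyRange 0 mc 1)[j]'(by
          rw [PySem.List.length_pyRange_one]; omega) = (j : Int) := by
        simp [PySem.List.getElem_pyRange_one]
      rw [hcolval]
      have hGij : (G[i]'hGi)[j]'hj2 =
          match positions.reverse.find? (fun p => p.1 == (i : Int) && p.2.1 == (j : Int)) with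
          | some p => p.2.2
          | none => (g0[i]'(by omega))[j]'(by rw [hg0row i (by omega)]; exact hjN) := by
        exact pvGrid_get mr mc positions g0 hg0len hg0row i j hiN hjN hGi hj2
      have hrev : positions.reverse.find? (fun p => p.1 == (i : Int) && p.2.1 == (j : Int)) =
          positions.find? (fun p => p.1 == (i : Int) && p.2.1 == (j : Int)) := by
        apply pvFind_rev positions ((i : Int), (j : Int)) hnd
        intro p hp
        simp only [Bool.and_eq_true, beq_iff_eq] at hp
        exact Prod.ext hp.1 hp.2
      have hblank : (g0[i]'(by omega))[j]'(by rw [hg0row i (by omega)]; exact hjN) = " " := by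
        simp [hg0]
      rw [hGij, hrev]
      cases hf : positions.find? (fun p => p.1 == (i : Int) && p.2.1 == (j : Int)) with
      | some q => simp
      | none => simp [hblank]

-- ===== VERDICT (by name: the statement is the Claim_ definition above) =====
theorem display_positions_spec : Claim_equal_display_positions := by
  intro positions _hdom hpre
  unfold Spec_display_positions display_positions display_positions_alt
  show _ = (positions.foldl (pvStep _ _) _).map _
  exact pvMain positions hpre.2 _ _
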